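-- pv_equiv track=rewrite | github.com/Rhaegal222/Unical | Primo Anno/Fondamenti di Programmazione 1/EPLPAPS/Esercizi PDF/esercizio7r.py | ricorsiva
-- ===== SOURCE A (Python) =====
-- def ricorsiva(f1, f2, i):
--     if i >= len(f1):
--         return True
--     if len(f1) != len(f2):
--         return False
--     if f1[i] != f2[i]:
--         return False
--     return ricorsiva(f1, f2, i+1)
-- ===== SOURCE B (Python) =====
-- def ricorsiva(f1, f2, i):
--     n = len(f1)
--     while i < n:
--         if n != len(f2):
--             return False
--         if f1[i] != f2[i]:
--             return False
--         i += 1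
--     return True
-- ===== Notes on version B (the rewrite author's own statement) =====
-- stated objective: simpler
-- what changed: The recursion on (f1, f2, i) is replaced by an iterative while-loop over the same index with early returns; no call stack is built.
import Mathlib
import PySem

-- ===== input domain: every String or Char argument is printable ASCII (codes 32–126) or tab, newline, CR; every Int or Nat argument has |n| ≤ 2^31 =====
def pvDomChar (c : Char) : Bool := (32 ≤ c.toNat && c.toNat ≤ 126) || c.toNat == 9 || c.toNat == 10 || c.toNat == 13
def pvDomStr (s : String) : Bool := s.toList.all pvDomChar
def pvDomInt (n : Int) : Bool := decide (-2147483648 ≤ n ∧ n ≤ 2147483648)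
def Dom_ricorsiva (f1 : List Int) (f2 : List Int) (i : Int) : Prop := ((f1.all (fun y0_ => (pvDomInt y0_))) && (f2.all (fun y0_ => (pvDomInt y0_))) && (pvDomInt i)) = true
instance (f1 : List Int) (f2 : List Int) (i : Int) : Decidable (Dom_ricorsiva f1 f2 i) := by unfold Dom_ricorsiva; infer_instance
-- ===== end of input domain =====

-- B replaces A's recursion by an iterative while-loop over the same index (simpler: no call stack).

-- ===== PORT A =====
-- Literal port of the recursion; an out-of-range element access (Python IndexError) yields
-- `false` here and is excluded by Pre_ricorsiva below.
def ricorsiva (f1 : List Int) (f2 : List Int) (i : Int) : Bool :=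
  if (f1.length : Int) ≤ i then true
  else if (f1.length : Int) ≠ (f2.length : Int) then false
  else
    match PySem.List.pyGet? f1 i, PySem.List.pyGet? f2 i with
    | some a, some b => if a ≠ b then false else ricorsiva f1 f2 (i + 1)
    | _, _ => false   -- IndexError in Python; outside Pre_ricorsiva
termination_by ((f1.length : Int) - i).toNat
decreasing_by omega

-- ===== PORT B =====
-- The while-loop `while i < n` of Source B: the fuel is the number of remaining iterations,
-- fixed up front as (n - i).toNat; fuel 0 means the guard i < n is false, so return True.
def whileLoopB (f1 : List Int) (f2 : List Int) : Nat → Int → Bool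
  | 0, _ => true
  | fuel + 1, i =>
    if (f1.length : Int) ≠ (f2.length : Int) then false
    else
      match PySem.List.pyGet? f1 i with
      | none => false   -- IndexError in Python; outside Pre_ricorsiva
      | some a =>
        match PySem.List.pyGet? f2 i with
        | none => false   -- IndexError in Python; outside Pre_ricorsiva
        | some b => if a = b then whileLoopB f1 f2 fuel (i + 1) else false

def ricorsiva_alt (f1 : List Int) (f2 : List Int) (i : Int) : Bool :=
  whileLoopB f1 f2 ((f1.length : Int) - i).toNat i

-- ===== PRECONDITION & SPEC =====
-- Pre_ excludes exactly the inputs where Python A raises IndexError: i below -len(f1) while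
-- the loop would access f1[i] (i < len(f1) and the lengths are equal).
def Pre_ricorsiva (f1 : List Int) (f2 : List Int) (i : Int) : Prop :=
  i < (f1.length : Int) → (f1.length : Int) = (f2.length : Int) → -(f1.length : Int) ≤ i
instance (f1 : List Int) (f2 : List Int) (i : Int) : Decidable (Pre_ricorsiva f1 f2 i) := by unfold Pre_ricorsiva; infer_instance

def pvWitness_ricorsiva : List Int × List Int × Int := ([1, 2, 3], [1, 2, 3], 0)

def Spec_ricorsiva (f1 : List Int) (f2 : List Int) (i : Int) (out : Bool) : Prop := out = ricorsiva_alt f1 f2 i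
instance (f1 : List Int) (f2 : List Int) (i : Int) (out : Bool) : Decidable (Spec_ricorsiva f1 f2 i out) := by unfold Spec_ricorsiva; infer_instance

-- ===== CLAIM (what is proved, stated in full; the proofs are below) =====
def Claim_equal_ricorsiva : Prop := ∀ (f1 : List Int) (f2 : List Int) (i : Int), Dom_ricorsiva f1 f2 i → Pre_ricorsiva f1 f2 i → Spec_ricorsiva f1 f2 i (ricorsiva f1 f2 i)

-- ===== LEMMAS AND PROOFS =====

-- The recursion and the fuelled loop agree whenever the fuel equals the remaining iteration count.
theorem ricorsiva_eq_loop (f1 f2 : List Int) :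
    ∀ (fuel : Nat) (i : Int), fuel = ((f1.length : Int) - i).toNat →
      ricorsiva f1 f2 i = whileLoopB f1 f2 fuel i := by
  intro fuel
  induction fuel with
  | zero =>
    intro i h
    have hle : (f1.length : Int) ≤ i := by omega
    simp [ricorsiva, whileLoopB, hle]
  | succ n ih =>
    intro i h
    have hlt : i < (f1.length : Int) := by omega
    rw [ricorsiva]
    simp only [whileLoopB, if_neg (by omega : ¬ (f1.length : Int) ≤ i)]
    by_cases hlen : (f1.length : Int) = (f2.length : Int)
    · simp only [hlen, ne_eq, not_true_eq_false, if_false]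
      cases PySem.List.pyGet? f1 i with
      | none => rfl
      | some a =>
        cases PySem.List.pyGet? f2 i with
        | none => rfl
        | some b =>
          by_cases hab : a = b
          · simp only [hab, not_true_eq_false, if_false]
            exact ih (i + 1) (by omega)
          · simp [hab]
    · simp [hlen]

-- ===== VERDICT (by name: the statement is the Claim_ definition above) =====
theorem ricorsiva_spec : Claim_equal_ricorsiva := by
  intro f1 f2 i _ _
  unfold Spec_ricorsiva ricorsiva_alt
  exact ricorsiva_eq_loop f1 f2 _ i rfl
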